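-- pv_equiv track=rewrite | github.com/Circuit-Overtime/LG-CISH | LG-COSH/bitstream/converter.py | bits_to_chunks
-- ===== SOURCE A (Python) =====
-- def bits_to_chunks(bits: str, chunk_size: int) -> tuple[list[int], int]:
--     """Split a binary string into fixed-size chunks.
--
--     Args:
--         bits: binary string (e.g. "010010000100...")
--         chunk_size: bits per chunk (= log2 of database size)
--
--     Returns:
--         (chunks, padding) where:
--         - chunks: list of integer indices, each in range [0, 2^chunk_size)
--         - padding: number of zero-padding bits added to the last chunk
--     """
--     padding = (chunk_size - (len(bits) % chunk_size)) % chunk_size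
--     padded = bits + "0" * padding
--
--     chunks = []
--     for i in range(0, len(padded), chunk_size):
--         chunk_bits = padded[i : i + chunk_size]
--         chunks.append(int(chunk_bits, 2))
--
--     return chunks, padding
-- ===== SOURCE B (Python) =====
-- def bits_to_chunks(bits: str, chunk_size: int) -> tuple[list[int], int]:
--     """Parse the whole bit string once as one big integer, then extract the
--     chunks arithmetically with shifts and a mask (no padded-string building,
--     no per-chunk slicing/re-parsing)."""
--     padding = (chunk_size - (len(bits) % chunk_size)) % chunk_size
--     nchunks = (len(bits) + padding) // chunk_size
--     value = (int(bits, 2) << padding) if nchunks > 0 else 0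
--     mask = (1 << chunk_size) - 1 if nchunks > 0 else 0
--     chunks = [(value >> (chunk_size * (nchunks - 1 - j))) & mask for j in range(nchunks)]
--     return chunks, padding
-- ===== Notes on version B (the rewrite author's own statement) =====
-- stated objective: alternative
-- what changed: Replaces A's build-padded-string-then-slice-and-reparse-every-chunk loop with a single int(bits, 2) parse followed by arithmetic extraction of each chunk via shifts and a mask.
-- outside the precondition, e.g. on bits_to_chunks('1_', 6): A returns ([16], 4), B raises ValueError
import Mathlib
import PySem

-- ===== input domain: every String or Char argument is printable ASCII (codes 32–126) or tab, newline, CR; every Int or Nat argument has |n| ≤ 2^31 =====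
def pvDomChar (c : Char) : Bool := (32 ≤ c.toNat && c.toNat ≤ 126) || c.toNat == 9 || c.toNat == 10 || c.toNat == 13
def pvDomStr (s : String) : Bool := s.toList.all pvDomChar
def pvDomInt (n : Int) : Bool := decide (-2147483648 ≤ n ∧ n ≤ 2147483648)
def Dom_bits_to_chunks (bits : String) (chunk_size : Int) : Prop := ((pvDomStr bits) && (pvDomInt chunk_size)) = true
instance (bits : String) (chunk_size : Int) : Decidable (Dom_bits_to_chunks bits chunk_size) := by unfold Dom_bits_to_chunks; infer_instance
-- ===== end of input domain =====

-- B parses the bit string once as one big integer and extracts the chunks with shifts and a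
-- mask, instead of A's building a padded string and slicing + re-parsing every chunk
-- (objective: alternative).

-- ===== PORT A =====
-- Hand-port of Python's int(s, 2) as used on A's slices: exact on the nonempty all-'0'/'1'
-- slices that arise under Pre_ (on other strings Python's int(., 2) raises ValueError or
-- accepts sign/whitespace/underscore forms; Pre_ admits only '0'/'1' characters when the
-- slicing loop runs, so those never occur here).
def pvBinVal (cs : List Char) : Int :=
  cs.foldl (fun a c => a * 2 + (if c = '1' then 1 else 0)) 0

def bits_to_chunks (bits : String) (chunk_size : Int) : List Int × Int :=
  let padding := PySem.Int.mod (chunk_size - PySem.Int.mod (PySem.Str.len bits) chunk_size) chunk_size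
  let padded := bits.toList ++ List.replicate padding.toNat '0'
  let chunks := (PySem.List.pyRange 0 (padded.length : Int) chunk_size).foldl
      (fun acc i => acc ++ [pvBinVal (PySem.List.slice padded (some i) (some (i + chunk_size)))]) []
  (chunks, padding)

-- ===== PORT B =====
-- int(bits, 2) is the same hand-port pvBinVal (exact on the all-'0'/'1' strings Pre_ admits
-- whenever nchunks > 0); '<<'/'>>'/'&' are Lean's <<< / >>> / PySem.Int.band; the shift
-- amounts are nonnegative whenever they are evaluated (nchunks > 0 forces chunk_size > 0).
def bits_to_chunks_alt (bits : String) (chunk_size : Int) : List Int × Int :=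
  let padding := PySem.Int.mod (chunk_size - PySem.Int.mod (PySem.Str.len bits) chunk_size) chunk_size
  let nchunks := PySem.Int.floordiv (PySem.Str.len bits + padding) chunk_size
  let value := if 0 < nchunks then (pvBinVal bits.toList) <<< padding.toNat else 0
  let mask := if 0 < nchunks then ((1 : Int) <<< chunk_size.toNat) - 1 else 0
  let chunks := (PySem.List.pyRange 0 nchunks 1).map
      (fun j => PySem.Int.band (value >>> (chunk_size * (nchunks - 1 - j)).toNat) mask)
  (chunks, padding)

-- ===== PRECONDITION & SPEC =====
-- Pre_ excludes chunk_size = 0 (A raises ZeroDivisionError) and, for positive chunk_size,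
-- strings with characters other than '0'/'1': there A usually raises ValueError, and on the
-- few int()-acceptable oddities (underscores, whitespace, a sign) A's value comes from
-- re-parsing padded slices and B raises or parses differently (see the cite).
def Pre_bits_to_chunks (bits : String) (chunk_size : Int) : Prop :=
  chunk_size ≠ 0 ∧ (0 < chunk_size → bits.toList.all (fun c => c == '0' || c == '1') = true)
instance (bits : String) (chunk_size : Int) : Decidable (Pre_bits_to_chunks bits chunk_size) := by
  unfold Pre_bits_to_chunks; infer_instance

def pvWitness_bits_to_chunks : String × Int := ("10110", 2)

def Spec_bits_to_chunks (bits : String) (chunk_size : Int) (out : List Int × Int) : Prop :=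
  out = bits_to_chunks_alt bits chunk_size
instance (bits : String) (chunk_size : Int) (out : List Int × Int) : Decidable (Spec_bits_to_chunks bits chunk_size out) := by
  unfold Spec_bits_to_chunks; infer_instance

-- ===== CLAIM (what is proved, stated in full; the proofs are below) =====
def Claim_equal_bits_to_chunks : Prop := ∀ (bits : String) (chunk_size : Int), Dom_bits_to_chunks bits chunk_size → Pre_bits_to_chunks bits chunk_size → Spec_bits_to_chunks bits chunk_size (bits_to_chunks bits chunk_size)

-- ===== LEMMAS AND PROOFS =====

-- trailing '0's multiply the accumulated value by 2^p
theorem pvBinVal_append_zeros (xs : List Char) (p : Nat) :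
    pvBinVal (xs ++ List.replicate p '0') = pvBinVal xs * 2 ^ p := by
  induction p with
  | zero => simp
  | succ p ih =>
    rw [List.replicate_succ', ← List.append_assoc]
    show (xs ++ List.replicate p '0' ++ ['0']).foldl _ 0 = _
    rw [List.foldl_append]
    show (pvBinVal (xs ++ List.replicate p '0')) * 2 + (if '0' = '1' then 1 else 0) = _
    rw [ih]; simp; ring

-- the fold with an arbitrary accumulator
theorem pvBinVal_foldl_acc (zs : List Char) : ∀ a : Int,
    zs.foldl (fun a c => a * 2 + (if c = '1' then 1 else 0)) a =
      a * 2 ^ zs.length + pvBinVal zs := by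
  induction zs with
  | nil => intro a; simp [pvBinVal]
  | cons ch t ih =>
    intro a
    show t.foldl _ (a * 2 + _) = _
    rw [ih (a * 2 + (if ch = '1' then 1 else 0))]
    show _ = a * 2 ^ (t.length + 1) + t.foldl _ ((0 : Int) * 2 + _)
    rw [ih ((0 : Int) * 2 + (if ch = '1' then 1 else 0))]
    ring

-- place-value decomposition of the parse
theorem pvBinVal_append (xs zs : List Char) :
    pvBinVal (xs ++ zs) = pvBinVal xs * 2 ^ zs.length + pvBinVal zs := by
  show (xs ++ zs).foldl _ 0 = _
  rw [List.foldl_append]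
  exact pvBinVal_foldl_acc zs (pvBinVal xs)

-- every character contributes one bit, so the value is bounded by 2^length
theorem pvBinVal_bounds (ys : List Char) : 0 ≤ pvBinVal ys ∧ pvBinVal ys < 2 ^ ys.length := by
  induction ys with
  | nil => simp [pvBinVal]
  | cons ch t ih =>
    have h : pvBinVal (ch :: t) =
        ((0 : Int) * 2 + (if ch = '1' then 1 else 0)) * 2 ^ t.length + pvBinVal t := by
      show t.foldl _ ((0 : Int) * 2 + _) = _
      exact pvBinVal_foldl_acc t _
    have hpow : (0 : Int) < 2 ^ t.length := pow_pos (by norm_num) _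
    constructor
    · rw [h]; split_ifs <;> nlinarith [ih.1]
    · rw [h, List.length_cons, pow_succ]
      split_ifs <;> nlinarith [ih.2]

-- a shifted-and-masked window of the big integer is the parse of the corresponding slice
theorem pvChunk (ys : List Char) (c K j : Nat) (hlen : ys.length = c * K) (hj : j < K) :
    PySem.Int.band ((pvBinVal ys) >>> (c * (K - 1 - j))) ((2 : Int) ^ c - 1) =
      pvBinVal ((ys.drop (c * j)).take c) := by
  set pre := ys.take (c * j) with hpre_def
  set chunk := (ys.drop (c * j)).take c with hchunk_def
  set suf := (ys.drop (c * j)).drop c with hsuf_def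
  have hjk : c * j + c ≤ c * K := by
    have h1 : c * (j + 1) ≤ c * K := Nat.mul_le_mul_left c hj
    rw [Nat.mul_succ] at h1; omega
  have hys : ys = (pre ++ chunk) ++ suf := by
    rw [hpre_def, hchunk_def, hsuf_def, List.append_assoc, List.take_append_drop,
      List.take_append_drop]
  have hchunk_len : chunk.length = c := by
    rw [hchunk_def]; simp [hlen]; omega
  have hsuf_len : suf.length = c * (K - 1 - j) := by
    rw [hsuf_def]
    simp only [List.length_drop, hlen]
    have h2 : K - 1 - j = K - (j + 1) := by omega
    rw [h2, Nat.mul_sub, Nat.mul_succ]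
    omega
  obtain ⟨hS0, hSlt⟩ := pvBinVal_bounds suf
  obtain ⟨hC0, hClt⟩ := pvBinVal_bounds chunk
  have hP0 : 0 ≤ pvBinVal pre := (pvBinVal_bounds pre).1
  rw [hchunk_len] at hClt
  rw [hsuf_len] at hSlt
  have hW : pvBinVal ys =
      pvBinVal (pre ++ chunk) * 2 ^ (c * (K - 1 - j)) + pvBinVal suf := by
    conv_lhs => rw [hys]
    rw [pvBinVal_append (pre ++ chunk) suf, hsuf_len]
  rw [hW, Int.shiftRight_eq_div_pow]
  have hcastpow : ((2 ^ (c * (K - 1 - j)) : Nat) : Int) = 2 ^ (c * (K - 1 - j)) := by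
    push_cast; ring
  rw [hcastpow]
  have hre : pvBinVal (pre ++ chunk) * 2 ^ (c * (K - 1 - j)) + pvBinVal suf =
      pvBinVal suf + pvBinVal (pre ++ chunk) * 2 ^ (c * (K - 1 - j)) := by ring
  rw [hre, Int.add_mul_ediv_right _ _ (ne_of_gt (pow_pos (by norm_num) _)),
    Int.ediv_eq_zero_of_lt hS0 hSlt, zero_add]
  -- the mask keeps the low c bits
  rw [pvBinVal_append pre chunk, hchunk_len]
  have hx0 : 0 ≤ pvBinVal pre * 2 ^ c + pvBinVal chunk :=
    add_nonneg (mul_nonneg hP0 (pow_nonneg (by norm_num) _)) hC0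
  have hone : (1 : Nat) ≤ 2 ^ c := Nat.one_le_two_pow
  have hmask : ((2 : Int) ^ c - 1) = ((2 ^ c - 1 : Nat) : Int) := by
    rw [Nat.cast_sub hone]; push_cast; ring
  have hxcast : pvBinVal pre * 2 ^ c + pvBinVal chunk =
      (((pvBinVal pre * 2 ^ c + pvBinVal chunk).toNat : Nat) : Int) :=
    (Int.toNat_of_nonneg hx0).symm
  rw [hxcast, hmask, PySem.Int.band_natCast, Nat.and_two_pow_sub_one_eq_mod,
    Int.natCast_mod, ← hxcast]
  have hpowcast : ((2 ^ c : Nat) : Int) = 2 ^ c := by push_cast; ring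
  have hre2 : pvBinVal pre * 2 ^ c + pvBinVal chunk =
      pvBinVal chunk + 2 ^ c * pvBinVal pre := by ring
  rw [hpowcast, hre2, Int.add_mul_emod_self_left, Int.emod_eq_of_lt hC0 hClt]

-- range(0, c*K, c) is the K chunk starts
theorem pyRange_mul (c K : Nat) (hc : 0 < c) :
    PySem.List.pyRange 0 ((c * K : Nat) : Int) ((c : Nat) : Int) =
      (List.range K).map (fun i => ((c * i : Nat) : Int)) := by
  rw [PySem.List.pyRange_of_pos _ _ (by exact_mod_cast hc)]
  cases K with
  | zero => simp
  | succ K' =>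
    have hpos : (0 : Int) < ((c * (K' + 1) : Nat) : Int) := by
      exact_mod_cast Nat.mul_pos hc (Nat.succ_pos K')
    rw [if_pos hpos]
    have harith : ((c * (K' + 1) : Nat) : Int) - 0 + ((c : Nat) : Int) - 1 =
        (((c : Nat) : Int) - 1) + ((K' + 1 : Nat) : Int) * ((c : Nat) : Int) := by
      push_cast; ring
    have hcI : (0 : Int) < ((c : Nat) : Int) := by exact_mod_cast hc
    rw [harith, Int.add_mul_ediv_right _ _ (by omega),
        Int.ediv_eq_zero_of_lt (by omega) (by omega)]
    simp only [zero_add, Int.toNat_natCast]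
    apply List.map_congr_left
    intro i _
    push_cast; ring

-- ===== VERDICT (by name: the statement is the Claim_ definition above) =====
theorem bits_to_chunks_spec : Claim_equal_bits_to_chunks := by
  intro bits cs _ hpre
  obtain ⟨hne0, hbinif⟩ := hpre
  simp only [Spec_bits_to_chunks, bits_to_chunks, bits_to_chunks_alt, PySem.Str.len_eq]
  by_cases hposQ : 0 < cs
  · -- positive chunk size
    obtain ⟨c, rfl⟩ : ∃ c : Nat, cs = ((c : Nat) : Int) :=
      ⟨cs.toNat, (Int.toNat_of_nonneg (by omega)).symm⟩
    simp only [Int.toNat_natCast]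
    have hcpos : 0 < c := by exact_mod_cast hposQ
    have hp0 : 0 ≤ PySem.Int.mod (((c : Nat) : Int) - PySem.Int.mod ((bits.toList.length : Nat) : Int) ((c : Nat) : Int)) ((c : Nat) : Int) := PySem.Int.mod_nonneg _ hposQ
    have hplt : PySem.Int.mod (((c : Nat) : Int) - PySem.Int.mod ((bits.toList.length : Nat) : Int) ((c : Nat) : Int)) ((c : Nat) : Int) < ((c : Nat) : Int) := PySem.Int.mod_lt _ hposQ
    have hpP : PySem.Int.mod (((c : Nat) : Int) - PySem.Int.mod ((bits.toList.length : Nat) : Int) ((c : Nat) : Int)) ((c : Nat) : Int) = (((PySem.Int.mod (((c : Nat) : Int) - PySem.Int.mod ((bits.toList.length : Nat) : Int) ((c : Nat) : Int)) ((c : Nat) : Int)).toNat : Nat) : Int) := (Int.toNat_of_nonneg hp0).symm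
    have hnrk : c * (bits.toList.length / c) + bits.toList.length % c =
        bits.toList.length := Nat.div_add_mod bits.toList.length c
    have hrlt : bits.toList.length % c < c := Nat.mod_lt _ hcpos
    have hinner : PySem.Int.mod ((bits.toList.length : Nat) : Int) ((c : Nat) : Int) =
        ((bits.toList.length % c : Nat) : Int) := by
      rw [PySem.Int.mod_eq_emod_of_pos hposQ]
      exact_mod_cast (Int.natCast_mod bits.toList.length c).symm
    have hPval : (bits.toList.length % c = 0 ∧ (PySem.Int.mod (((c : Nat) : Int) - PySem.Int.mod ((bits.toList.length : Nat) : Int) ((c : Nat) : Int)) ((c : Nat) : Int)).toNat = 0) ∨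
        (bits.toList.length % c ≠ 0 ∧ bits.toList.length % c + (PySem.Int.mod (((c : Nat) : Int) - PySem.Int.mod ((bits.toList.length : Nat) : Int) ((c : Nat) : Int)) ((c : Nat) : Int)).toNat = c) := by
      by_cases hr : bits.toList.length % c = 0
      · left
        refine ⟨hr, ?_⟩
        have hp : PySem.Int.mod (((c : Nat) : Int) - PySem.Int.mod ((bits.toList.length : Nat) : Int) ((c : Nat) : Int)) ((c : Nat) : Int) = 0 := by
          rw [hinner, hr, PySem.Int.mod_eq_emod_of_pos hposQ]
          simp
        omega
      · right
        refine ⟨hr, ?_⟩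
        have hp : PySem.Int.mod (((c : Nat) : Int) - PySem.Int.mod ((bits.toList.length : Nat) : Int) ((c : Nat) : Int)) ((c : Nat) : Int) = ((c : Nat) : Int) - ((bits.toList.length % c : Nat) : Int) := by
          rw [hinner, PySem.Int.mod_eq_emod_of_pos hposQ]
          apply Int.emod_eq_of_lt <;> omega
        omega
    obtain ⟨K, hK⟩ : ∃ K, bits.toList.length + (PySem.Int.mod (((c : Nat) : Int) - PySem.Int.mod ((bits.toList.length : Nat) : Int) ((c : Nat) : Int)) ((c : Nat) : Int)).toNat = c * K := by
      rcases hPval with ⟨hr, hP⟩ | ⟨hr, hP⟩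
      · exact ⟨bits.toList.length / c, by omega⟩
      · exact ⟨bits.toList.length / c + 1, by rw [Nat.mul_succ]; omega⟩
    have hlenp : (((bits.toList ++ List.replicate (PySem.Int.mod (((c : Nat) : Int) - PySem.Int.mod ((bits.toList.length : Nat) : Int) ((c : Nat) : Int)) ((c : Nat) : Int)).toNat '0').length : Nat) : Int) =
        ((c * K : Nat) : Int) := by
      simp only [List.length_append, List.length_replicate]
      exact_mod_cast hK
    -- B's chunk count is K
    have hch : PySem.Int.floordiv (((bits.toList.length : Nat) : Int) + PySem.Int.mod (((c : Nat) : Int) - PySem.Int.mod ((bits.toList.length : Nat) : Int) ((c : Nat) : Int)) ((c : Nat) : Int)) ((c : Nat) : Int) = ((K : Nat) : Int) := by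
      rw [hpP]
      have hnp : ((bits.toList.length : Nat) : Int) + (((PySem.Int.mod (((c : Nat) : Int) - PySem.Int.mod ((bits.toList.length : Nat) : Int) ((c : Nat) : Int)) ((c : Nat) : Int)).toNat : Nat) : Int) = ((c * K : Nat) : Int) := by
        exact_mod_cast hK
      rw [hnp, PySem.Int.floordiv_eq_ediv_of_pos hposQ]
      push_cast
      rw [Int.mul_ediv_cancel_left _ (by exact_mod_cast hcpos.ne' : ((c : Nat) : Int) ≠ 0)]
    simp only [hch]
    by_cases hK0 : K = 0
    · subst hK0
      rw [PySem.List.pyRange_one_eq_nil (by simp), hlenp, pyRange_mul c 0 hcpos]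
      simp
    · have hKposI : (0 : Int) < ((K : Nat) : Int) := by
        exact_mod_cast Nat.pos_of_ne_zero hK0
      simp only [hKposI, if_true]
      rw [Int.shiftLeft_eq, ← pvBinVal_append_zeros, Int.shiftLeft_eq, one_mul,
        PySem.List.pyRange_zero_natCast, List.map_map, hlenp,
        pyRange_mul c K hcpos, PySem.List.foldl_append_singleton_eq_map,
        List.nil_append, List.map_map]
      refine congrArg₂ Prod.mk ?_ rfl
      apply List.map_congr_left
      intro j hj
      rw [List.mem_range] at hj
      simp only [Function.comp_apply]
      rw [PySem.List.slice_natCast_add _ (c * j) c]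
      have hu : ((c : Nat) : Int) * (((K : Nat) : Int) - 1 - ((j : Nat) : Int)) =
          ((c * (K - 1 - j) : Nat) : Int) := by
        have h1 : (((K : Nat) : Int) - 1 - ((j : Nat) : Int)) = ((K - 1 - j : Nat) : Int) := by
          omega
        rw [h1]; push_cast; ring
      rw [hu, Int.toNat_natCast]
      refine (pvChunk _ c K j ?_ hj).symm
      simp only [List.length_append, List.length_replicate]
      exact hK
  · -- negative chunk size: no chunks on either side
    have hneg : cs < 0 := by omega
    have hA : PySem.List.pyRange 0
        (((bits.toList ++ List.replicate (PySem.Int.mod (cs - PySem.Int.mod ((bits.toList.length : Nat) : Int) cs) cs).toNat '0').length : Nat) : Int) cs = [] := by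
      simp only [PySem.List.pyRange]
      rw [if_neg hne0, if_neg hposQ,
        if_neg (by omega :
          ¬ (((bits.toList ++ List.replicate (PySem.Int.mod (cs - PySem.Int.mod ((bits.toList.length : Nat) : Int) cs) cs).toNat '0').length : Nat) : Int) < 0)]
      simp
    rw [hA]
    have hp_gt : cs < PySem.Int.mod (cs - PySem.Int.mod ((bits.toList.length : Nat) : Int) cs) cs := (PySem.Int.mod_neg_bounds _ hneg).1
    have hq : PySem.Int.floordiv (((bits.toList.length : Nat) : Int) + PySem.Int.mod (cs - PySem.Int.mod ((bits.toList.length : Nat) : Int) cs) cs) cs ≤ 0 := by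
      rw [← PySem.Int.floordiv_neg_neg (((bits.toList.length : Nat) : Int) + PySem.Int.mod (cs - PySem.Int.mod ((bits.toList.length : Nat) : Int) cs) cs) cs]
      have hlt := (PySem.Int.floordiv_lt_iff_lt_mul
        (a := -(((bits.toList.length : Nat) : Int) + PySem.Int.mod (cs - PySem.Int.mod ((bits.toList.length : Nat) : Int) cs) cs)) (b := -cs) (q := 1) (by omega)).mpr (by omega)
      omega
    rw [PySem.List.pyRange_one_eq_nil hq]
    simp
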